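-- pv_equiv track=rewrite | github.com/entelecheia/ekorpkit | ekorpkit/io/parse/misc.py | parse_reuters_contents
-- ===== SOURCE A (Python) =====
-- def parse_reuters_contents(contents):
--     text = ""
--     title = ""
--     author = ""
--     date = ""
--     url = ""
--
--     for i, line in enumerate(contents.split("\n")):
--         if i == 0 and line.startswith("-- "):
--             title = line.replace("-- ", "").strip()
--         elif i == 1 and line.startswith("-- "):
--             author = line.replace("-- ", "").replace("By ", "").strip()
--         elif i == 2 and line.startswith("-- "):
--             date = line.replace("-- ", "").strip()
--         elif i == 3 and line.startswith("-- "):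
--             url = line.replace("-- ", "").strip()
--         else:
--             text += line + "\n"
--     doc = {
--         "title": title,
--         "author": author,
--         "date": date,
--         "url": url,
--         "text": text.strip(),
--     }
--     return [doc]
-- ===== SOURCE B (Python) =====
-- def parse_reuters_contents(contents):
--     lines = contents.split("\n")
--
--     def header(i):
--         return i < len(lines) and lines[i].startswith("-- ")
--
--     title = lines[0].replace("-- ", "").strip() if header(0) else ""
--     author = lines[1].replace("-- ", "").replace("By ", "").strip() if header(1) else ""
--     date = lines[2].replace("-- ", "").strip() if header(2) else ""
--     url = lines[3].replace("-- ", "").strip() if header(3) else ""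
--     body = [lines[i] for i in range(min(4, len(lines))) if not header(i)] + lines[4:]
--     return [{
--         "title": title,
--         "author": author,
--         "date": date,
--         "url": url,
--         "text": "\n".join(body).strip(),
--     }]
-- ===== Notes on version B (the rewrite author's own statement) =====
-- stated objective: simpler
-- what changed: Replaces A's single enumerate-loop threading five string accumulators with direct indexed reads of the first four lines for the header fields plus a separate join-the-remaining-lines pass for the text.
import Mathlib
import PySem

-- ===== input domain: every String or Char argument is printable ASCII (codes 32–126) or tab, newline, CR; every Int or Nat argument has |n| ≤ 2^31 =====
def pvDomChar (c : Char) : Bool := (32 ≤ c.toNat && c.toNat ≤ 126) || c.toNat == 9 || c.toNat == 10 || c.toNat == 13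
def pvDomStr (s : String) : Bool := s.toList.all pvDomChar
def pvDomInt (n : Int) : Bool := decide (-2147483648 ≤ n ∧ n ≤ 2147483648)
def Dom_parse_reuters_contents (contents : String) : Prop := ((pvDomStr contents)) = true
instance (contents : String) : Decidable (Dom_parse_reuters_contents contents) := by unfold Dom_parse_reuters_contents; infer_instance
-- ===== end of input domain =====

-- B re-implements A by a different decomposition: instead of one enumerate-loop threading five
-- accumulators, B reads the four header fields directly off lines[0..3] and builds the text in a
-- separate pass as '\n'.join of the non-header lines (objective: simpler, same cost).

-- contents.split("\n")  (exact: PySem.Chars.splitOn is Python's str.split with a non-empty separator)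
def pvSplitNl (s : String) : List String :=
  (PySem.Chars.splitOn s.toList ['\n']).map String.ofList

-- ===== PORT A =====
-- the loop body of A (state = (text, title, author, date, url), p = (i, line))
def pvStepA (st : String × String × String × String × String) (p : Int × String) :
    String × String × String × String × String :=
  if p.1 == 0 && PySem.Str.startswith p.2 "-- " then
    (st.1, PySem.Str.strip (PySem.Str.replace p.2 "-- " ""), st.2.2.1, st.2.2.2.1, st.2.2.2.2)
  else if p.1 == 1 && PySem.Str.startswith p.2 "-- " then
    (st.1, st.2.1,
      PySem.Str.strip (PySem.Str.replace (PySem.Str.replace p.2 "-- " "") "By " ""),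
      st.2.2.2.1, st.2.2.2.2)
  else if p.1 == 2 && PySem.Str.startswith p.2 "-- " then
    (st.1, st.2.1, st.2.2.1, PySem.Str.strip (PySem.Str.replace p.2 "-- " ""), st.2.2.2.2)
  else if p.1 == 3 && PySem.Str.startswith p.2 "-- " then
    (st.1, st.2.1, st.2.2.1, st.2.2.2.1, PySem.Str.strip (PySem.Str.replace p.2 "-- " ""))
  else
    (st.1 ++ p.2 ++ "\n", st.2.1, st.2.2.1, st.2.2.2.1, st.2.2.2.2)

def parse_reuters_contents (contents : String) : List (List (String × String)) :=
  let st := (PySem.List.enumerate (pvSplitNl contents)).foldl pvStepA ("", "", "", "", "")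
  [[("title", st.2.1), ("author", st.2.2.1), ("date", st.2.2.2.1), ("url", st.2.2.2.2),
    ("text", PySem.Str.strip st.1)]]

-- ===== PORT B =====
-- header(i) from Source B: i < len(lines) and lines[i].startswith("-- ")
def pvHeader (lines : List String) (i : Nat) : Bool :=
  decide (i < lines.length) && PySem.Str.startswith (lines.getD i "") "-- "

def parse_reuters_contents_alt (contents : String) : List (List (String × String)) :=
  let lines := pvSplitNl contents
  let title := if pvHeader lines 0 then PySem.Str.strip (PySem.Str.replace (lines.getD 0 "") "-- " "") else ""
  let author := if pvHeader lines 1 then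
      PySem.Str.strip (PySem.Str.replace (PySem.Str.replace (lines.getD 1 "") "-- " "") "By " "")
    else ""
  let date := if pvHeader lines 2 then PySem.Str.strip (PySem.Str.replace (lines.getD 2 "") "-- " "") else ""
  let url := if pvHeader lines 3 then PySem.Str.strip (PySem.Str.replace (lines.getD 3 "") "-- " "") else ""
  let body := (PySem.List.pyRange 0 (min 4 (lines.length : Int)) 1).filterMap
      (fun i => if pvHeader lines i.toNat then none else some (lines.getD i.toNat ""))
    ++ PySem.List.slice lines (some 4) none
  [[("title", title), ("author", author), ("date", date), ("url", url),
    ("text", PySem.Str.strip (PySem.Str.join "\n" body))]]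

-- ===== PRECONDITION & SPEC =====
def Spec_parse_reuters_contents (contents : String) (out : List (List (String × String))) : Prop := out = parse_reuters_contents_alt contents
instance (contents : String) (out : List (List (String × String))) : Decidable (Spec_parse_reuters_contents contents out) := by unfold Spec_parse_reuters_contents; infer_instance

-- ===== CLAIM (what is proved, stated in full; the proofs are below) =====
def Claim_equal_parse_reuters_contents : Prop := ∀ (contents : String), Dom_parse_reuters_contents contents → Spec_parse_reuters_contents contents (parse_reuters_contents contents)

-- ===== LEMMAS AND PROOFS =====

-- the text-accumulating step of A's else-branch
def pvCatStep (tx : String) (l : String) : String := tx ++ l ++ "\n"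

lemma pv_foldA_ge4 (rest : List String) (s : Int) (hs : 4 ≤ s)
    (st : String × String × String × String × String) :
    (PySem.List.enumerate rest s).foldl pvStepA st =
      (rest.foldl pvCatStep st.1, st.2.1, st.2.2.1, st.2.2.2.1, st.2.2.2.2) := by
  induction rest generalizing s st with
  | nil => simp [PySem.List.enumerate_nil]
  | cons x xs ih =>
    rw [PySem.List.enumerate_cons, List.foldl_cons, List.foldl_cons]
    have h0 : (s == (0:Int)) = false := by simp; omega
    have h1 : (s == (1:Int)) = false := by simp; omega
    have h2 : (s == (2:Int)) = false := by simp; omega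
    have h3 : (s == (3:Int)) = false := by simp; omega
    rw [ih (s+1) (by omega)]
    simp [pvStepA, h0, h1, h2, h3, pvCatStep]

lemma pv_cat_toList (L : List String) (tx : String) :
    (L.foldl pvCatStep tx).toList
      = tx.toList ++ ((L.map String.toList).map (fun l => l ++ ['\n'])).flatten := by
  induction L generalizing tx with
  | nil => simp
  | cons x xs ih => simp [pvCatStep, ih]

lemma pv_strip_append_nl (cs : List Char) :
    PySem.Chars.strip (cs ++ ['\n']) = PySem.Chars.strip cs := by
  have hnl : PySem.Chars.isspace '\n' = true := by decide
  unfold PySem.Chars.strip PySem.Chars.lstrip PySem.Chars.rstrip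
  rw [List.dropWhile_append]
  split_ifs with h
  · simp only [List.isEmpty_iff] at h
    rw [h]
    simp [hnl]
  · rw [List.reverse_append]
    simp [hnl]

lemma pv_flatten_eq_join (Ls : List (List Char)) (h : Ls ≠ []) :
    (Ls.map (fun l => l ++ ['\n'])).flatten = PySem.Chars.join ['\n'] Ls ++ ['\n'] := by
  induction Ls with
  | nil => simp at h
  | cons x xs ih =>
    cases xs with
    | nil => simp [PySem.Chars.join, List.intercalate]
    | cons y ys =>
      rw [List.map_cons, List.flatten_cons, ih (by simp)]
      simp [PySem.Chars.join, List.intercalate, List.intersperse]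

lemma pv_strip_cat (L : List String) :
    PySem.Str.strip (L.foldl pvCatStep "") = PySem.Str.strip (PySem.Str.join "\n" L) := by
  apply String.toList_inj.mp
  rw [PySem.Str.toList_strip, PySem.Str.toList_strip, PySem.Str.toList_join, pv_cat_toList]
  cases L with
  | nil => simp [PySem.Chars.join, List.intercalate]
  | cons x xs =>
    rw [pv_flatten_eq_join ((x :: xs).map String.toList) (by simp)]
    have h2 : ("\n" : String).toList = ['\n'] := rfl
    have h0 : ("" : String).toList = [] := rfl
    rw [h2, h0, List.nil_append, pv_strip_append_nl]

-- main characterisation: A's fold over an arbitrary line list equals B's field/body computation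
lemma pv_key (lines : List String) :
    (PySem.List.enumerate lines).foldl pvStepA ("", "", "", "", "") =
      ((((PySem.List.pyRange 0 (min 4 (lines.length : Int)) 1).filterMap
          (fun i => if pvHeader lines i.toNat then none else some (lines.getD i.toNat "")))
        ++ PySem.List.slice lines (some 4) none).foldl pvCatStep "",
       (if pvHeader lines 0 then PySem.Str.strip (PySem.Str.replace (lines.getD 0 "") "-- " "") else ""),
       (if pvHeader lines 1 then
          PySem.Str.strip (PySem.Str.replace (PySem.Str.replace (lines.getD 1 "") "-- " "") "By " "")
        else ""),
       (if pvHeader lines 2 then PySem.Str.strip (PySem.Str.replace (lines.getD 2 "") "-- " "") else ""),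
       (if pvHeader lines 3 then PySem.Str.strip (PySem.Str.replace (lines.getD 3 "") "-- " "") else "")) := by
  match lines with
  | [] => rfl
  | [a] =>
    rw [show ((([a] : List String).length : Int)) = 1 from by simp,
      show PySem.List.pyRange 0 (min 4 (1 : Int)) 1 = [0] from by decide]
    by_cases h0 : PySem.Chars.startswith a.toList ['-','-',' '] = true <;>
      simp [PySem.List.enumerate_cons, PySem.List.enumerate_nil, pvStepA, pvHeader, h0,
        PySem.List.slice, PySem.List.clampIdx, pvCatStep]
  | [a, b] =>
    rw [show ((([a, b] : List String).length : Int)) = 2 from by simp,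
      show PySem.List.pyRange 0 (min 4 (2 : Int)) 1 = [0, 1] from by decide]
    by_cases h0 : PySem.Chars.startswith a.toList ['-','-',' '] = true <;>
    by_cases h1 : PySem.Chars.startswith b.toList ['-','-',' '] = true <;>
      simp [PySem.List.enumerate_cons, PySem.List.enumerate_nil, pvStepA, pvHeader, h0, h1,
        PySem.List.slice, PySem.List.clampIdx, pvCatStep]
  | [a, b, c] =>
    rw [show ((([a, b, c] : List String).length : Int)) = 3 from by simp,
      show PySem.List.pyRange 0 (min 4 (3 : Int)) 1 = [0, 1, 2] from by decide]
    by_cases h0 : PySem.Chars.startswith a.toList ['-','-',' '] = true <;>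
    by_cases h1 : PySem.Chars.startswith b.toList ['-','-',' '] = true <;>
    by_cases h2 : PySem.Chars.startswith c.toList ['-','-',' '] = true <;>
      simp [PySem.List.enumerate_cons, PySem.List.enumerate_nil, pvStepA, pvHeader, h0, h1, h2,
        PySem.List.slice, PySem.List.clampIdx, pvCatStep]
  | a :: b :: c :: d :: rest =>
    have hlen : min (4:Int) (((a :: b :: c :: d :: rest).length : Int)) = 4 := by
      simp; omega
    have hslice : PySem.List.slice (a :: b :: c :: d :: rest) (some 4) none = rest := by
      rw [PySem.List.slice_from _ (by norm_num)]; rfl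
    have hrange : PySem.List.pyRange 0 4 1 = [0, 1, 2, 3] := by decide
    have q0 : pvHeader (a :: b :: c :: d :: rest) 0 = PySem.Chars.startswith a.toList ['-','-',' '] := by simp [pvHeader]
    have q1 : pvHeader (a :: b :: c :: d :: rest) 1 = PySem.Chars.startswith b.toList ['-','-',' '] := by simp [pvHeader]
    have q2 : pvHeader (a :: b :: c :: d :: rest) 2 = PySem.Chars.startswith c.toList ['-','-',' '] := by simp [pvHeader]
    have q3 : pvHeader (a :: b :: c :: d :: rest) 3 = PySem.Chars.startswith d.toList ['-','-',' '] := by simp [pvHeader]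
    rw [PySem.List.enumerate_cons, PySem.List.enumerate_cons, PySem.List.enumerate_cons,
      PySem.List.enumerate_cons]
    simp only [List.foldl_cons]
    rw [show (0:Int)+1 = 1 from rfl, show (1:Int)+1 = 2 from rfl, show (2:Int)+1 = 3 from rfl, show (3:Int)+1 = 4 from rfl,
      pv_foldA_ge4 rest 4 (by norm_num), hlen, hslice, hrange]
    by_cases h0 : PySem.Chars.startswith a.toList ['-','-',' '] = true <;>
    by_cases h1 : PySem.Chars.startswith b.toList ['-','-',' '] = true <;>
    by_cases h2 : PySem.Chars.startswith c.toList ['-','-',' '] = true <;>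
    by_cases h3 : PySem.Chars.startswith d.toList ['-','-',' '] = true <;>
      simp [pvStepA, q0, q1, q2, q3, h0, h1, h2, h3, pvCatStep]

-- ===== VERDICT (by name: the statement is the Claim_ definition above) =====
theorem parse_reuters_contents_spec : Claim_equal_parse_reuters_contents := by
  intro contents _
  unfold Spec_parse_reuters_contents parse_reuters_contents parse_reuters_contents_alt
  rw [pv_key (pvSplitNl contents)]
  simp only []
  rw [pv_strip_cat]
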